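-- pv_equiv track=rewrite | github.com/Srivatsav-Busi/Academic-Projects | CustomGPT/src/recruiter_messaging.py | _parse_templates
-- ===== SOURCE A (Python) =====
-- from typing import Dict, List, Any, Optional
--
-- def _parse_templates(content: str) -> List[str]:
--     """Parse template content into individual templates."""
--     templates = []
--     current_template = []
--
--     for line in content.split('\n'):
--         if line.startswith('## Template') or line.startswith('### Template'):
--             if current_template:
--                 templates.append('\n'.join(current_template))
--                 current_template = []
--         elif line.strip():
--             current_template.append(line)
--
--     if current_template:
--         templates.append('\n'.join(current_template))
--
--     return templates
-- ===== SOURCE B (Python) =====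
-- def _parse_templates(content):
--     """Parse template content into individual templates."""
--     def is_header(line):
--         return line.startswith('## Template') or line.startswith('### Template')
--
--     templates = []
--     lines = content.split('\n')
--     while lines:
--         k = 0
--         while k < len(lines) and not is_header(lines[k]):
--             k += 1
--         body = [l for l in lines[:k] if l.strip()]
--         if body:
--             templates.append('\n'.join(body))
--         lines = lines[k + 1:]
--     return templates
-- ===== Notes on version B (the rewrite author's own statement) =====
-- stated objective: alternative
-- what changed: Replaces A's single stateful loop with a flush-on-header accumulator by a segment-at-a-time decomposition: repeatedly scan to the next header line, filter the segment's blank lines and join it, then continue after the header.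
import Mathlib
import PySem

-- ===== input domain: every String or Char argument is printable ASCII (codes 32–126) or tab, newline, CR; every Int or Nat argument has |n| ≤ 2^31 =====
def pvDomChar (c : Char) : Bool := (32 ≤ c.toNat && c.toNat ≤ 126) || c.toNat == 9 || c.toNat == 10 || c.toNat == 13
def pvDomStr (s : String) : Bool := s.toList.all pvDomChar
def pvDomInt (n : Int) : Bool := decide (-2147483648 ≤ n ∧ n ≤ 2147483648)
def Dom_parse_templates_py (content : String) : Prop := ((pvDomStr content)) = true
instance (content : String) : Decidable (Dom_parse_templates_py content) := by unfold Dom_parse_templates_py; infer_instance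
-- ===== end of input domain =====

-- B replaces A's single stateful accumulator loop with a segment-at-a-time scan
-- (find the next header, emit the filtered segment, continue after it): an
-- alternative decomposition, same cost on typical inputs.

-- shared helpers (same line predicates both Pythons use)
def pvIsHdr (line : String) : Bool :=
  PySem.Str.startswith line "## Template" || PySem.Str.startswith line "### Template"

def pvNonblank (line : String) : Bool := PySem.Str.strip line != ""

-- ===== PORT A =====
-- state = (templates, current_template); one foldl over the lines, then the final flush
def pvStepA (st : List String × List String) (line : String) : List String × List String :=
  if pvIsHdr line then
    if st.2 ≠ [] then (st.1 ++ [PySem.Str.join "\n" st.2], []) else st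
  else if pvNonblank line then (st.1, st.2 ++ [line]) else st

-- content.split('\n'): sep "\n" ≠ "" so split? is never none; getD [] only discharges the option
def parse_templates_py (content : String) : List String :=
  let st := ((PySem.Str.split? content "\n").getD []).foldl pvStepA ([], [])
  if st.2 ≠ [] then st.1 ++ [PySem.Str.join "\n" st.2] else st.1

-- ===== PORT B =====
-- B's outer while loop re-binds `lines = lines[k+1:]`, i.e. structural recursion on
-- the suffix after the first header line; k is the first header index (the inner scan).
def pvSegsB (lines : List String) : List String :=
  if h : lines = [] then []
  else
    let body := (lines.takeWhile (fun l => !pvIsHdr l)).filter pvNonblank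
    (if body = [] then [] else [PySem.Str.join "\n" body]) ++
      pvSegsB ((lines.dropWhile (fun l => !pvIsHdr l)).drop 1)
termination_by lines.length
decreasing_by
  cases lines with
  | nil => exact absurd rfl h
  | cons x xs =>
    have hd := List.length_dropWhile_le (p := fun l => !pvIsHdr l) (l := x :: xs)
    cases hw : (x :: xs).dropWhile (fun l => !pvIsHdr l) with
    | nil => simp
    | cons y ys => rw [hw] at hd; simp [List.length_cons] at hd ⊢; omega

def parse_templates_py_alt (content : String) : List String :=
  pvSegsB ((PySem.Str.split? content "\n").getD [])

-- ===== PRECONDITION & SPEC =====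
def Spec_parse_templates_py (content : String) (out : List String) : Prop := out = parse_templates_py_alt content
instance (content : String) (out : List String) : Decidable (Spec_parse_templates_py content out) := by unfold Spec_parse_templates_py; infer_instance

-- ===== CLAIM (what is proved, stated in full; the proofs are below) =====
def Claim_equal_parse_templates_py : Prop := ∀ (content : String), Dom_parse_templates_py content → Spec_parse_templates_py content (parse_templates_py content)

-- ===== LEMMAS AND PROOFS =====

-- the unfolding equation of pvSegsB, valid also for []
theorem pvSegsB_eq (lines : List String) :
    pvSegsB lines =
      (if ((lines.takeWhile (fun l => !pvIsHdr l)).filter pvNonblank) = [] then []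
       else [PySem.Str.join "\n" ((lines.takeWhile (fun l => !pvIsHdr l)).filter pvNonblank)]) ++
      pvSegsB ((lines.dropWhile (fun l => !pvIsHdr l)).drop 1) := by
  by_cases h : lines = []
  · subst h; simp [pvSegsB]
  · rw [pvSegsB]; simp [h]

-- A's loop + final flush, started from any state (ts, cur), equals ts ++ the
-- segment decomposition where cur is prepended to the first segment's body.
theorem key (lines : List String) (ts cur : List String) :
    (if (lines.foldl pvStepA (ts, cur)).2 ≠ [] then
        (lines.foldl pvStepA (ts, cur)).1 ++ [PySem.Str.join "\n" (lines.foldl pvStepA (ts, cur)).2]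
      else (lines.foldl pvStepA (ts, cur)).1) =
      ts ++
      (if (cur ++ (lines.takeWhile (fun l => !pvIsHdr l)).filter pvNonblank) = [] then []
       else [PySem.Str.join "\n" (cur ++ (lines.takeWhile (fun l => !pvIsHdr l)).filter pvNonblank)]) ++
      pvSegsB ((lines.dropWhile (fun l => !pvIsHdr l)).drop 1) := by
  induction lines generalizing ts cur with
  | nil =>
    simp only [List.foldl_nil, List.takeWhile_nil, List.dropWhile_nil, List.filter_nil,
      List.append_nil, List.drop_nil]
    rw [pvSegsB]
    by_cases h : cur = [] <;> simp [h]
  | cons l ls ih =>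
    by_cases hh : pvIsHdr l
    · by_cases hc : cur = []
      · subst hc
        simp only [List.foldl_cons, pvStepA, hh, if_true, ne_eq, not_true_eq_false,
          List.takeWhile_cons, List.dropWhile_cons]
        simp only [Bool.not_true, Bool.false_eq_true, if_false, List.drop_one, List.tail_cons,
          List.filter_nil, List.append_nil]
        rw [ih ts [], pvSegsB_eq ls]
        simp
      · simp only [List.foldl_cons, pvStepA, hh, ne_eq, hc, not_false_iff, if_pos,
          List.takeWhile_cons, List.dropWhile_cons]
        simp only [Bool.not_true, Bool.false_eq_true, if_false, List.drop_one, List.tail_cons,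
          List.filter_nil, List.append_nil]
        rw [ih (ts ++ [PySem.Str.join "\n" cur]) [], pvSegsB_eq ls]
        simp [hc]
    · by_cases hb : pvNonblank l
      · simp only [List.foldl_cons, pvStepA, hh, Bool.false_eq_true, if_false, hb, if_true,
          List.takeWhile_cons, List.dropWhile_cons]
        simp only [Bool.not_false, if_true, List.filter_cons, hb]
        rw [ih ts (cur ++ [l])]
        simp
      · simp only [List.foldl_cons, pvStepA, hh, Bool.false_eq_true, if_false, hb,
          List.takeWhile_cons, List.dropWhile_cons]
        simp only [Bool.not_false, if_true, List.filter_cons, hb, Bool.false_eq_true, if_false]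
        exact ih ts cur

-- ===== VERDICT (by name: the statement is the Claim_ definition above) =====
theorem parse_templates_py_spec : Claim_equal_parse_templates_py := by
  intro content _
  unfold Spec_parse_templates_py parse_templates_py parse_templates_py_alt
  rw [key ((PySem.Str.split? content "\n").getD []) [] []]
  rw [pvSegsB_eq ((PySem.Str.split? content "\n").getD [])]
  simp
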